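-- pv_equiv track=rewrite | github.com/adorahelen/Exam-Preparation | src/que/problem16.py | solution
-- ===== SOURCE A (Python) =====
-- import math
--
-- def solution(progresses, speeds):
--     answer = []
--     n = len(progresses)
--
--     # 각 작업이 완료되기까지 남은 일수를 계산
--     days_left = [math.ceil((100 - progresses[i]) / speeds[i]) for i in range(n)]
--
--     count = 0
--     max_day = days_left[0]
--
--     for i in range(n):
--         # 현재 작업이 현재 배포의 최대 일수보다 일찍 완료될 수 있다면 함께 배포
--         if days_left[i] <= max_day:
--             count += 1
--         else:
--             # 그렇지 않다면 지금까지의 배포 기능 수를 저장하고 새로운 배포 묶음 시작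
--             answer.append(count)
--             count = 1
--             max_day = days_left[i]
--
--     # 마지막으로 남은 기능들에 대해 처리
--     answer.append(count)
--     return answer
-- ===== SOURCE B (Python) =====
-- import math
--
-- def solution(progresses, speeds):
--     # days to finish each feature
--     days = [math.ceil((100 - p) / s) for p, s in zip(progresses, speeds)]
--
--     # pass 1: label each feature with the id of the deployment group it joins
--     labels = []
--     gid = 0
--     running_max = days[0]
--     for d in days:
--         if d > running_max:
--             gid += 1
--             running_max = d
--         labels.append(gid)
--
--     # pass 2: count the features per group id, in order
--     counts = [0] * (gid + 1)
--     for g in labels: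
--         counts[g] += 1
--     return counts
-- ===== Notes on version B (the rewrite author's own statement) =====
-- stated objective: alternative
-- what changed: A groups features in one inline pass with a count/max accumulator appending to the answer; B first labels every feature with a group id in one pass, then counts the features per group id in a separate counting pass over per-group buckets.
import Mathlib
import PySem

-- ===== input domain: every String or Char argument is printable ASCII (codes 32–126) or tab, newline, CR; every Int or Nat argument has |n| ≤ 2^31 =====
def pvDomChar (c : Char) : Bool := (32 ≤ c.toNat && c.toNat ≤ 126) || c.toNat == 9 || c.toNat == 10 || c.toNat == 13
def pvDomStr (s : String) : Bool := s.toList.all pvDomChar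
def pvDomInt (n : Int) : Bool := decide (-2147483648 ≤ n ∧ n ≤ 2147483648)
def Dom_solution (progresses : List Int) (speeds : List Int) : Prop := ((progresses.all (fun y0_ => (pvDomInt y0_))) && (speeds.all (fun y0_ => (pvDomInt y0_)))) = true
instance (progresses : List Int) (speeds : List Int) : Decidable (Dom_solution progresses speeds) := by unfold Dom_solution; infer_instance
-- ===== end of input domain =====

-- B differs from A by decomposition: A groups with one inline count/max accumulator;
-- B labels each feature with a group id in one pass and counts per group in a second pass.

-- ===== PORT A =====
-- math.ceil((100 - p) / s): exact as integer ceiling division on Dom (|100 - p| ≤ 2^31 + 100 < 2^53,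
-- so the float quotient never rounds across an integer); ceil(a/b) = -((-a) // b).
def pvCeilDiv (a : Int) (b : Int) : Int := -(PySem.Int.floordiv (-a) b)

-- loop state (answer, count, max_day)
def pvStepA (st : List Int × Int × Int) (d : Int) : List Int × Int × Int :=
  if d ≤ st.2.2 then (st.1, st.2.1 + 1, st.2.2) else (st.1 ++ [st.2.1], 1, d)

def solution (progresses : List Int) (speeds : List Int) : List Int :=
  let n : Int := progresses.length
  let daysLeft := (PySem.List.pyRange 0 n 1).map (fun i =>
    pvCeilDiv (100 - PySem.List.pyGetD progresses i 0) (PySem.List.pyGetD speeds i 0))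
  let maxDay0 := PySem.List.pyGetD daysLeft 0 0  -- days_left[0]; in range under Pre_
  let st := (PySem.List.pyRange 0 n 1).foldl
    (fun st i => pvStepA st (PySem.List.pyGetD daysLeft i 0)) ([], 0, maxDay0)
  st.1 ++ [st.2.1]

-- ===== PORT B =====
-- loop state (labels, gid, running_max)
def pvStepB (st : List Int × Int × Int) (d : Int) : List Int × Int × Int :=
  if st.2.2 < d then (st.1 ++ [st.2.1 + 1], st.2.1 + 1, d)
  else (st.1 ++ [st.2.1], st.2.1, st.2.2)

-- counts[g] += 1 ; every label g satisfies 0 ≤ g ≤ gid by construction, so the index is in range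
def pvInc (cs : List Int) (g : Int) : List Int := cs.set g.toNat (cs.getD g.toNat 0 + 1)

def solution_alt (progresses : List Int) (speeds : List Int) : List Int :=
  let days := (progresses.zip speeds).map (fun ps => pvCeilDiv (100 - ps.1) ps.2)
  let st := days.foldl pvStepB ([], 0, PySem.List.pyGetD days 0 0)
  st.1.foldl pvInc (List.replicate (st.2.1 + 1).toNat 0)

-- ===== PRECONDITION & SPEC =====
-- Pre_ excludes exactly the inputs on which A raises: empty progresses (IndexError on
-- days_left[0]), speeds shorter than progresses (IndexError), and a zero entry among the
-- used speeds (ZeroDivisionError).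
def Pre_solution (progresses : List Int) (speeds : List Int) : Prop :=
  progresses ≠ [] ∧ progresses.length ≤ speeds.length ∧
    ∀ s ∈ speeds.take progresses.length, s ≠ 0
instance (progresses : List Int) (speeds : List Int) : Decidable (Pre_solution progresses speeds) := by
  unfold Pre_solution; infer_instance

def pvWitness_solution : List Int × List Int := ([93, 30, 55], [1, 30, 5])

def Spec_solution (progresses : List Int) (speeds : List Int) (out : List Int) : Prop := out = solution_alt progresses speeds
instance (progresses : List Int) (speeds : List Int) (out : List Int) : Decidable (Spec_solution progresses speeds out) := by unfold Spec_solution; infer_instance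

-- ===== CLAIM (what is proved, stated in full; the proofs are below) =====
def Claim_equal_solution : Prop := ∀ (progresses : List Int) (speeds : List Int), Dom_solution progresses speeds → Pre_solution progresses speeds → Spec_solution progresses speeds (solution progresses speeds)

-- ===== LEMMAS AND PROOFS =====

-- the count vector B's second pass produces, in closed form
def pvCountVec (L : List Int) (g : Int) : List Int :=
  (List.range (g + 1).toNat).map (fun (j : Nat) => (L.count (j : Int) : Int))

-- the days lists of the two ports coincide
lemma pv_days_eq (ps ss : List Int) (h : ps.length ≤ ss.length) :
    (PySem.List.pyRange 0 (ps.length : Int) 1).map (fun i =>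
      pvCeilDiv (100 - PySem.List.pyGetD ps i 0) (PySem.List.pyGetD ss i 0))
    = (ps.zip ss).map (fun t => pvCeilDiv (100 - t.1) t.2) := by
  apply List.ext_getElem
  · simp [PySem.List.length_pyRange_one, List.length_zip]; omega
  · intro k h1 h2
    simp only [List.getElem_map, PySem.List.getElem_pyRange_one, zero_add]
    have hk : k < ps.length := by simpa [PySem.List.length_pyRange_one] using h1
    rw [List.getElem_zip]
    simp [PySem.List.pyGetD_natCast, hk, Nat.lt_of_lt_of_le hk h]

-- B's counting pass, over an arbitrary accumulator: pointwise add the occurrence counts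
lemma pv_inc_fold (L : List Int) :
    ∀ cs : List Int, (∀ x ∈ L, 0 ≤ x ∧ x.toNat < cs.length) →
    L.foldl pvInc cs = (List.range cs.length).map (fun (j : Nat) => cs.getD j 0 + (L.count (j : Int) : Int)) := by
  induction L with
  | nil =>
    intro cs _
    simp only [List.foldl_nil, List.count_nil, Int.natCast_zero, add_zero]
    apply List.ext_getElem
    · simp
    · intro k h1 h2; simp [List.getD, h1]
  | cons x L ih =>
    intro cs hb
    have hx := hb x (by simp)
    rw [List.foldl_cons]
    rw [ih (pvInc cs x) (by intro y hy; have := hb y (by simp [hy]); simpa [pvInc] using this)]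
    have hlen : (pvInc cs x).length = cs.length := by simp [pvInc]
    rw [hlen]
    apply List.map_congr_left
    intro j hj
    have hjlt : j < cs.length := List.mem_range.mp hj
    by_cases hjx : j = x.toNat
    · subst hjx
      have hxx : x = (x.toNat : Int) := (Int.toNat_of_nonneg hx.1).symm
      simp [pvInc, hx.2, ← hxx]
      ring
    · have hne : x ≠ (j : Int) := by
        intro e; apply hjx; omega
      simp [pvInc, hjlt, Ne.symm hjx, hne]

-- B's counting pass started from the zero buckets computes pvCountVec
lemma pv_counts_eq (L : List Int) (g : Int) (hg : 0 ≤ g)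
    (hL : ∀ x ∈ L, 0 ≤ x ∧ x ≤ g) :
    L.foldl pvInc (List.replicate (g + 1).toNat 0) = pvCountVec L g := by
  rw [pv_inc_fold L _ (by intro x hx; have := hL x hx; simp only [List.length_replicate]; omega)]
  simp [pvCountVec]

-- the core invariant: A's inline grouping equals B's label-then-count
lemma pv_core (rest : List Int) :
    ∀ (ans : List Int) (count m : Int) (L : List Int) (g : Int),
      0 ≤ g →
      (∀ x ∈ L, 0 ≤ x ∧ x ≤ g) →
      ans = (List.range g.toNat).map (fun (j : Nat) => (L.count (j : Int) : Int)) →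
      count = (L.count g : Int) →
      (let sA := rest.foldl pvStepA (ans, count, m);
       let sB := rest.foldl pvStepB (L, g, m);
       sA.1 ++ [sA.2.1] = sB.1.foldl pvInc (List.replicate (sB.2.1 + 1).toNat 0)) := by
  induction rest with
  | nil =>
    intro ans count m L g hg hL hans hcount
    simp only [List.foldl_nil]
    rw [pv_counts_eq L g hg hL]
    have h1 : (g + 1).toNat = g.toNat + 1 := by omega
    have h2 : ((g.toNat : Int)) = g := Int.toNat_of_nonneg hg
    simp [pvCountVec, h1, List.range_succ, h2, hans, hcount]
  | cons d rest ih =>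
    intro ans count m L g hg hL hans hcount
    simp only [List.foldl_cons]
    by_cases hd : d ≤ m
    · have hB : pvStepB (L, g, m) d = (L ++ [g], g, m) := by
        simp [pvStepB, not_lt.mpr hd]
      have hA : pvStepA (ans, count, m) d = (ans, count + 1, m) := by
        simp [pvStepA, hd]
      rw [hA, hB]
      apply ih
      · exact hg
      · intro x hx
        rcases List.mem_append.mp hx with h | h
        · exact hL x h
        · simp at h; omega
      · rw [hans]
        apply List.map_congr_left
        intro j hj
        have : (j : Int) < g := by have := List.mem_range.mp hj; omega
        have hne : g ≠ (j : Int) := by omega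
        simp [List.count_append, hne]
      · simp [List.count_append, hcount]
    · rw [not_le] at hd
      have hB : pvStepB (L, g, m) d = (L ++ [g + 1], g + 1, d) := by
        simp [pvStepB, hd]
      have hA : pvStepA (ans, count, m) d = (ans ++ [count], 1, d) := by
        simp [pvStepA, not_le.mpr hd]
      rw [hA, hB]
      apply ih
      · omega
      · intro x hx
        rcases List.mem_append.mp hx with h | h
        · have := hL x h; exact ⟨this.1, by omega⟩
        · simp at h; omega
      · have h1 : (g + 1).toNat = g.toNat + 1 := by omega
        have h2 : ((g.toNat : Int)) = g := Int.toNat_of_nonneg hg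
        rw [h1, List.range_succ, List.map_append]
        have hfirst : (List.range g.toNat).map (fun (j : Nat) => ((L ++ [g + 1]).count (j : Int) : Int)) = ans := by
          rw [hans]
          apply List.map_congr_left
          intro j hj
          have : (j : Int) < g := by have := List.mem_range.mp hj; omega
          have hne : g + 1 ≠ (j : Int) := by omega
          simp [List.count_append, hne]
        have hlast : ((L ++ [g + 1]).count ((g.toNat : Int)) : Int) = count := by
          rw [h2, hcount]
          have hne : g + 1 ≠ g := by omega
          simp [List.count_append, hne]
        simp only [List.map_cons, List.map_nil]
        rw [hfirst, hlast]
      · have h0 : L.count (g + 1) = 0 := by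
          apply List.count_eq_zero.mpr
          intro hmem; have := hL _ hmem; omega
        simp [List.count_append, h0]

-- ===== VERDICT (by name: the statement is the Claim_ definition above) =====
theorem solution_spec : Claim_equal_solution := by
  intro ps ss _ hpre
  obtain ⟨hne, hlen, _⟩ := hpre
  show solution ps ss = solution_alt ps ss
  simp only [solution, solution_alt]
  rw [pv_days_eq ps ss hlen]
  have hdl : ((ps.zip ss).map (fun t => pvCeilDiv (100 - t.1) t.2)).length = ps.length := by
    simp [List.length_zip]; omega
  have hcast : (ps.length : Int) = (((ps.zip ss).map (fun t => pvCeilDiv (100 - t.1) t.2)).length : Int) := by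
    rw [hdl]
  rw [hcast, PySem.List.foldl_pyRange_zero_pyGetD']
  exact pv_core _ [] 0 _ [] 0 le_rfl (by simp) (by simp) (by simp)
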